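-- pv_equiv track=rewrite | github.com/dcazabat/PyBMS | src/bms/generator.py | _build_continuation_line
-- ===== SOURCE A (Python) =====
-- def _build_continuation_line(prefix: str, base_params: str, additional_params: list) -> str:
--     """Construye una línea con continuación BMS"""
--
--     # Primera línea: DFHMDF + parámetros básicos + primer parámetro adicional si cabe
--     first_line = prefix + base_params
--
--     remaining_params = additional_params[:]
--
--     # Intentar agregar parámetros a la primera línea hasta llegar al límite
--     while remaining_params:
--         next_param = remaining_params[0]
--         test_line = first_line + "," + next_param
--
--         # Dejar espacio para ",          *" (12 caracteres)
--         if len(test_line) + 12 <= 71: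
--             first_line = test_line
--             remaining_params.pop(0)
--         else:
--             break
--
--     # Si quedan parámetros, crear línea de continuación
--     if remaining_params:
--         first_line += ",          *"
--         continuation_line = f"               {','.join(remaining_params)}"
--         return first_line + "\n" + continuation_line
--     else:
--         return first_line
-- ===== SOURCE B (Python) =====
-- def _build_continuation_line(prefix: str, base_params: str, additional_params: list) -> str:
--     """Single pass: find the split index by running length, then slice once."""
--     line_len = len(prefix) + len(base_params)
--     k = 0
--     for p in additional_params:
--         if line_len + 1 + len(p) + 12 <= 71:
--             line_len += 1 + len(p)
--             k += 1
--         else: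
--             break
--     first_line = prefix + base_params + "".join("," + p for p in additional_params[:k])
--     rest = additional_params[k:]
--     if rest:
--         return first_line + ",          *\n               " + ",".join(rest)
--     return first_line
-- ===== Notes on version B (the rewrite author's own statement) =====
-- stated objective: alternative
-- what changed: Replaces the while-loop that repeatedly pops the list head and rebuilds the growing line string with a single length-tracking pass that computes a split index, then slices the list once and joins; the 71-column limit bounds the loop so the measured cost is the same.
import Mathlib
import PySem

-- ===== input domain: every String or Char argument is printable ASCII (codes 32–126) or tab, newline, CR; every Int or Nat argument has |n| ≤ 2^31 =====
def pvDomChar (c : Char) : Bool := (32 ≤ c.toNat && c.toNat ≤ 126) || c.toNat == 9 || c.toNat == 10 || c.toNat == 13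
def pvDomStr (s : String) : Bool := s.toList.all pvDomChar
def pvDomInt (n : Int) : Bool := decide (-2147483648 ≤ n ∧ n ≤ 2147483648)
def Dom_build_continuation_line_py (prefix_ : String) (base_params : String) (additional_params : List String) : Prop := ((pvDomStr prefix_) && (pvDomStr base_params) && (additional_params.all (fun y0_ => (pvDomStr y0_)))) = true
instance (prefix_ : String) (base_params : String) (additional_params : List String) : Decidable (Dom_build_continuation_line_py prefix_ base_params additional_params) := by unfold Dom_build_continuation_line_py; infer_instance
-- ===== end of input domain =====

-- B replaces A's pop-and-rebuild while-loop with a single length-tracking pass that finds the split index, then one slice and join; objective: alternative.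


-- ===== PORT A =====
-- A's while-loop state: (first_line, remaining_params); stops when the next param does not fit
def pvALoop (first_line : String) (remaining : List String) : String × List String :=
  match remaining with
  | [] => (first_line, [])
  | next_param :: rest =>
    let test_line := first_line ++ "," ++ next_param
    if PySem.Str.len test_line + 12 ≤ 71 then pvALoop test_line rest
    else (first_line, next_param :: rest)

def build_continuation_line_py (prefix_ : String) (base_params : String) (additional_params : List String) : String :=
  let st := pvALoop (prefix_ ++ base_params) additional_params
  if !st.2.isEmpty then
    (st.1 ++ ",          *") ++ "\n" ++ ("               " ++ PySem.Str.join "," st.2)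
  else
    st.1

-- ===== PORT B =====
-- B's single pass: number of leading params that fit, tracking only the running length
def pvBSplit (lineLen : Int) (params : List String) : Nat :=
  match params with
  | [] => 0
  | p :: rest =>
    if lineLen + 1 + PySem.Str.len p + 12 ≤ 71 then 1 + pvBSplit (lineLen + 1 + PySem.Str.len p) rest
    else 0

def build_continuation_line_py_alt (prefix_ : String) (base_params : String) (additional_params : List String) : String :=
  let k := pvBSplit (PySem.Str.len prefix_ + PySem.Str.len base_params) additional_params
  let first_line := prefix_ ++ base_params ++ PySem.Str.join "" ((additional_params.take k).map (fun p => "," ++ p))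
  let rest := additional_params.drop k
  if !rest.isEmpty then
    first_line ++ ",          *\n               " ++ PySem.Str.join "," rest
  else
    first_line

-- ===== PRECONDITION & SPEC =====
def Spec_build_continuation_line_py (prefix_ : String) (base_params : String) (additional_params : List String) (out : String) : Prop := out = build_continuation_line_py_alt prefix_ base_params additional_params
instance (prefix_ : String) (base_params : String) (additional_params : List String) (out : String) : Decidable (Spec_build_continuation_line_py prefix_ base_params additional_params out) := by unfold Spec_build_continuation_line_py; infer_instance

-- ===== CLAIM (what is proved, stated in full; the proofs are below) =====
def Claim_equal_build_continuation_line_py : Prop := ∀ (prefix_ : String) (base_params : String) (additional_params : List String), Dom_build_continuation_line_py prefix_ base_params additional_params → Spec_build_continuation_line_py prefix_ base_params additional_params (build_continuation_line_py prefix_ base_params additional_params)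

-- ===== LEMMAS AND PROOFS =====
theorem pvStrLen_append (s t : String) : PySem.Str.len (s ++ t) = PySem.Str.len s + PySem.Str.len t := by
  simp [PySem.Str.len]

theorem pvJoinEmpty_cons (x : String) (l : List String) :
    PySem.Str.join "" (x :: l) = x ++ PySem.Str.join "" l := by
  cases l with
  | nil => simp [PySem.Str.join, PySem.Chars.join_nil, PySem.Chars.join_singleton]
  | cons y ys => simp [PySem.Str.join, PySem.Chars.join_cons_cons]

theorem pvALoop_eq (f : String) (rem : List String) :
    pvALoop f rem =
      (f ++ PySem.Str.join "" ((rem.take (pvBSplit (PySem.Str.len f) rem)).map (fun p => "," ++ p)),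
       rem.drop (pvBSplit (PySem.Str.len f) rem)) := by
  induction rem generalizing f with
  | nil => simp [pvALoop, pvBSplit, PySem.Str.join, PySem.Chars.join_nil]
  | cons p rest ih =>
    have hlen : PySem.Str.len (f ++ "," ++ p) = PySem.Str.len f + 1 + PySem.Str.len p := by
      simp; omega
    by_cases h : PySem.Str.len f + 1 + PySem.Str.len p + 12 ≤ 71
    · simp only [pvALoop, pvBSplit, hlen, if_pos h, ih, Nat.add_comm 1 _, List.take_succ_cons,
        List.drop_succ_cons, List.map_cons]
      rw [pvJoinEmpty_cons]
      simp [String.append_assoc]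
    · simp only [pvALoop, pvBSplit, hlen, if_neg h]
      simp [PySem.Str.join, PySem.Chars.join_nil]

theorem pvLitCont (j : String) : (",          *" : String) ++ ("\n" ++ ("               " ++ j)) = ",          *\n               " ++ j := by
  have h : ((",          *" : String) ++ "\n" ++ "               ") = ",          *\n               " := by decide
  rw [← h, String.append_assoc, String.append_assoc]

theorem build_continuation_line_py_spec : Claim_equal_build_continuation_line_py := by
  intro prefix_ base_params additional_params _
  unfold Spec_build_continuation_line_py build_continuation_line_py build_continuation_line_py_alt
  rw [pvALoop_eq, pvStrLen_append]
  dsimp only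
  split_ifs with h
  · simp only [String.append_assoc, List.map_take, pvLitCont]
  · simp [String.append_assoc, List.map_take]
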